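-- pv_equiv track=rewrite | github.com/lilianschuster/glacier_overshoot_irreversibility_trough_water | B_main_analysis_figure_creation/analysis_func.py | find_largest_continuous_span
-- ===== SOURCE A (Python) =====
-- def find_largest_continuous_span(years):
--     # function to correctly find the largest continuous span of years in a list
--     max_span_start = years[0]
--     max_span_end = years[0]
--     current_span_start = years[0]
--     current_span_end = years[0]
--
--     for i in range(1, len(years)):
--         if years[i] == current_span_end + 1:
--             current_span_end = years[i]
--         else:
--             if (current_span_end - current_span_start) > (max_span_end - max_span_start):
--                 max_span_start = current_span_start
--                 max_span_end = current_span_end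
--             current_span_start = years[i]
--             current_span_end = years[i]
--
--         if (current_span_end - current_span_start) > (max_span_end - max_span_start):
--             max_span_start = current_span_start
--             max_span_end = current_span_end
--
--     return (max_span_start, max_span_end)
-- ===== SOURCE B (Python) =====
-- def find_largest_continuous_span(years):
--     # Group the years into consecutive-run segments, then take the first segment
--     # of maximal span (max() keeps the first maximum, matching A's tie-breaking).
--     segments = [(years[0], years[0])]
--     for y in years[1:]:
--         s, e = segments[-1]
--         if y == e + 1:
--             segments[-1] = (s, y)
--         else:
--             segments.append((y, y))
--     return max(segments, key=lambda seg: seg[1] - seg[0])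
-- ===== Notes on version B (the rewrite author's own statement) =====
-- stated objective: simpler
-- what changed: Replaces A's four-variable running max-tracking loop by a group-then-reduce decomposition: one pass collecting (start,end) run segments, then max() by span with first-maximum tie-breaking.
import Mathlib
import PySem

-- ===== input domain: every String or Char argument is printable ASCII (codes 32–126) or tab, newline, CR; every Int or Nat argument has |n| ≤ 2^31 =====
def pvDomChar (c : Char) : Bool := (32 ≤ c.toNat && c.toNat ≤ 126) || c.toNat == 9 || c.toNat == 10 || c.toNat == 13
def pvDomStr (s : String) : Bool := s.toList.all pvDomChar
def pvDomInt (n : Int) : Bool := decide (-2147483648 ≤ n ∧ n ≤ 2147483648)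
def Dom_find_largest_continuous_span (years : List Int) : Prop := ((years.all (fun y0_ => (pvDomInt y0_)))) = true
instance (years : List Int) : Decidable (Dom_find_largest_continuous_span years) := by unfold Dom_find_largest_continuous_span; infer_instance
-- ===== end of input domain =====

-- B replaces A's four-variable running max-tracking loop by a group-then-reduce
-- decomposition (collect run segments, then take the first maximal-span one); simpler, same cost.

-- ===== PORT A =====
-- A's loop, state (max_span_start, max_span_end, current_span_start, current_span_end)
def pvALoop (ms me cs ce : Int) : List Int → Int × Int
  | [] => (ms, me)
  | y :: ys =>
    if y = ce + 1 then
      let m := if y - cs > me - ms then (cs, y) else (ms, me)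
      pvALoop m.1 m.2 cs y ys
    else
      let m1 := if ce - cs > me - ms then (cs, ce) else (ms, me)
      let m := if y - y > m1.2 - m1.1 then (y, y) else m1
      pvALoop m.1 m.2 y y ys

def find_largest_continuous_span (years : List Int) : Int × Int :=
  match years with
  | [] => (0, 0)   -- years[0] raises IndexError in Python; excluded by Pre_
  | y :: ys => pvALoop y y y y ys

-- ===== PORT B =====
-- Python's max(…, key=span): keep the first element of strictly greater span
def pvStep (b x : Int × Int) : Int × Int := if x.2 - x.1 > b.2 - b.1 then x else b

-- segment-building loop; segments[-1] is `cur`, the earlier segments are `prev`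
def pvSegLoop (prev : List (Int × Int)) (cur : Int × Int) : List Int → List (Int × Int) × (Int × Int)
  | [] => (prev, cur)
  | y :: ys =>
    if y = cur.2 + 1 then pvSegLoop prev (cur.1, y) ys
    else pvSegLoop (prev ++ [cur]) (y, y) ys

def find_largest_continuous_span_alt (years : List Int) : Int × Int :=
  match years with
  | [] => (0, 0)   -- years[0] raises IndexError in Python; excluded by Pre_
  | y :: ys =>
    let r := pvSegLoop [] (y, y) ys
    match r.1 ++ [r.2] with
    | [] => (0, 0)   -- unreachable: segments is nonempty
    | p :: ps => ps.foldl pvStep p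

-- ===== PRECONDITION & SPEC =====
-- A (and B) raise IndexError on the empty list (years[0]); only that input is excluded.
def Pre_find_largest_continuous_span (years : List Int) : Prop := years ≠ []
instance (years : List Int) : Decidable (Pre_find_largest_continuous_span years) := by unfold Pre_find_largest_continuous_span; infer_instance
def pvWitness_find_largest_continuous_span : List Int := [2000, 2001, 2005]

def Spec_find_largest_continuous_span (years : List Int) (out : Int × Int) : Prop := out = find_largest_continuous_span_alt years
instance (years : List Int) (out : Int × Int) : Decidable (Spec_find_largest_continuous_span years out) := by unfold Spec_find_largest_continuous_span; infer_instance

-- ===== CLAIM (what is proved, stated in full; the proofs are below) =====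
def Claim_equal_find_largest_continuous_span : Prop := ∀ (years : List Int), Dom_find_largest_continuous_span years → Pre_find_largest_continuous_span years → Spec_find_largest_continuous_span years (find_largest_continuous_span years)

-- ===== LEMMAS AND PROOFS =====

-- first maximal-span element of prev ++ [c]
def pvFmc (prev : List (Int × Int)) (c : Int × Int) : Int × Int :=
  match prev with
  | [] => c
  | p :: ps => (ps ++ [c]).foldl pvStep p

theorem pvFmc_snoc (l : List (Int × Int)) (x c : Int × Int) :
    pvFmc (l ++ [x]) c = pvStep (pvFmc l x) c := by
  cases l with
  | nil => simp [pvFmc]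
  | cons p ps => simp [pvFmc, List.foldl_append]

theorem pvFmc_span_ge (prev : List (Int × Int)) (c : Int × Int) :
    c.2 - c.1 ≤ (pvFmc prev c).2 - (pvFmc prev c).1 := by
  cases prev with
  | nil => simp [pvFmc]
  | cons p ps =>
    simp only [pvFmc, List.foldl_append, List.foldl_cons, List.foldl_nil, pvStep]
    split <;> omega

theorem pvFmc_grow (prev : List (Int × Int)) (c c' : Int × Int)
    (h : c'.2 - c'.1 < c.2 - c.1) (hfst : c.1 = c'.1) :
    pvFmc prev c = pvStep (pvFmc prev c') c := by
  cases prev with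
  | nil => simp [pvFmc, pvStep]; omega
  | cons p ps =>
    simp only [pvFmc, List.foldl_append, List.foldl_cons, List.foldl_nil, pvStep]
    split_ifs <;> first | rfl | (exfalso; omega)

theorem pvStep_drop (X c : Int × Int) (h : c.2 - c.1 ≤ X.2 - X.1) : pvStep X c = X := by
  simp only [pvStep]; rw [if_neg]; omega

-- main invariant: A's running max equals the first maximal-span segment of B's
-- segments collected so far, and the current segment has nonnegative span.
theorem pvLoop_eq (ys : List Int) :
    ∀ (prev : List (Int × Int)) (s e : Int), 0 ≤ e - s →
      pvALoop (pvFmc prev (s, e)).1 (pvFmc prev (s, e)).2 s e ys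
        = pvFmc (pvSegLoop prev (s, e) ys).1 (pvSegLoop prev (s, e) ys).2 := by
  induction ys with
  | nil => intro prev s e _; simp [pvALoop, pvSegLoop]
  | cons y ys ih =>
    intro prev s e hspan
    by_cases hy : y = e + 1
    · subst hy
      have hstep : (if e + 1 - s > (pvFmc prev (s, e)).2 - (pvFmc prev (s, e)).1
            then (s, e + 1) else ((pvFmc prev (s, e)).1, (pvFmc prev (s, e)).2))
          = pvFmc prev (s, e + 1) := by
        rw [pvFmc_grow prev (s, e + 1) (s, e) (by simp) rfl]
        simp [pvStep]
      simp only [pvALoop, pvSegLoop]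
      rw [hstep]
      exact ih prev s (e + 1) (by omega)
    · have hge := pvFmc_span_ge prev (s, e)
      simp only [pvALoop, pvSegLoop, if_neg hy]
      have h1 : ¬ (e - s > (pvFmc prev (s, e)).2 - (pvFmc prev (s, e)).1) := by simp at hge ⊢; omega
      have h2 : ¬ ((y : Int) - y > (pvFmc prev (s, e)).2 - (pvFmc prev (s, e)).1) := by simp at hge ⊢; omega
      simp only [if_neg h1, if_neg h2]
      have hB : pvFmc (prev ++ [(s, e)]) (y, y) = pvFmc prev (s, e) := by
        rw [pvFmc_snoc]
        exact pvStep_drop _ _ (by simp at hge ⊢; omega)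
      rw [← hB]
      exact ih (prev ++ [(s, e)]) y y (by omega)

theorem alt_eq_fmc (years : List Int) (y : Int) (ys : List Int) (h : years = y :: ys) :
    find_largest_continuous_span_alt years
      = pvFmc (pvSegLoop [] (y, y) ys).1 (pvSegLoop [] (y, y) ys).2 := by
  subst h
  simp only [find_largest_continuous_span_alt]
  cases hp : (pvSegLoop [] (y, y) ys).1 with
  | nil => simp [pvFmc]
  | cons p ps => simp [pvFmc]

-- ===== VERDICT (by name: the statement is the Claim_ definition above) =====
theorem find_largest_continuous_span_spec : Claim_equal_find_largest_continuous_span := by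
  intro years _ hpre
  unfold Spec_find_largest_continuous_span
  cases years with
  | nil => exact absurd rfl hpre
  | cons y ys =>
    rw [alt_eq_fmc (y :: ys) y ys rfl]
    have h := pvLoop_eq ys [] y y (by omega)
    have h0 : pvFmc [] (y, y) = (y, y) := rfl
    rw [h0] at h
    exact h
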